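-- pv_equiv track=rewrite | github.com/sb123-github/JPEG-Compression-Pipeline | Code.py | abs_bin
-- ===== SOURCE A (Python) =====
-- def abs_bin(x):
--     x = int(x)
--     y = abs(x)
--     ans = bin(y)
--     ans = ans[2:]
--     n = len(ans)
--
--     if n == 1 and ans[0] == '0':
--         return ''
--
--     ans1 = ''
--
--     if y != x:
--         for pointer1 in range(n):
--             if ans[pointer1] == '0':
--                 ans1 += '1'
--             else:
--                 ans1 += '0'
--     else:
--         ans1 = ans
--
--     return ans1
-- ===== SOURCE B (Python) =====
-- def abs_bin(x):
--     x = int(x)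
--     y = abs(x)
--     if y == 0:
--         return ''
--     bits = format(y, 'b')
--     if x >= 0:
--         return bits
--     n = len(bits)
--     comp = (1 << n) - 1 - y
--     return format(comp, '0{}b'.format(n))
-- ===== Notes on version B (the rewrite author's own statement) =====
-- stated objective: simpler
-- what changed: Replaces the per-character flip loop over the binary string with a single closed-form one's-complement integer computation rendered via a width-padded binary format.
import Mathlib
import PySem

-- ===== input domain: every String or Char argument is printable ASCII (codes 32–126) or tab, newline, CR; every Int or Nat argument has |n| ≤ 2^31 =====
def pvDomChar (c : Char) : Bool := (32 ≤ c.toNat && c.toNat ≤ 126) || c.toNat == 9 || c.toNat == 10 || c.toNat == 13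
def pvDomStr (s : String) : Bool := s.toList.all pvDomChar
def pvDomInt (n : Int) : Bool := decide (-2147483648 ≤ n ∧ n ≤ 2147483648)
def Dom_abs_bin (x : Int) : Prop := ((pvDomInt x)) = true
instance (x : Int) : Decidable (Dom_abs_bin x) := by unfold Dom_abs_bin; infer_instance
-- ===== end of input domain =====

-- B replaces A's per-character flip loop with the closed-form one's complement (1<<n)-1-y, width-padded; objective: simpler.

-- ===== PORT A =====
def abs_bin (x : Int) : String :=
  let y : Int := |x|
  let ans : List Char := PySem.List.slice (PySem.Int.pyBin y).toList (some 2) none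
  let n : Nat := ans.length
  if n = 1 ∧ PySem.List.pyGetD ans 0 ' ' = '0' then "" else
  let ans1 : List Char :=
    if y ≠ x then
      (PySem.List.pyRange 0 (n : Int) 1).foldl
        (fun acc i => acc ++ [if PySem.List.pyGetD ans i ' ' = '0' then '1' else '0']) []
    else ans
  String.ofList ans1

-- ===== PORT B =====
def abs_bin_alt (x : Int) : String :=
  let y : Int := |x|
  if y = 0 then "" else
  let bits : List Char := PySem.Int.toBinChars y
  if x ≥ 0 then String.ofList bits else
  let n : Nat := bits.length
  let comp : Int := (1 <<< n) - 1 - y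
  let cb : List Char := PySem.Int.toBinChars comp
  String.ofList (List.replicate (n - cb.length) '0' ++ cb)

-- ===== PRECONDITION & SPEC =====
def Spec_abs_bin (x : Int) (out : String) : Prop := out = abs_bin_alt x
instance (x : Int) (out : String) : Decidable (Spec_abs_bin x out) := by unfold Spec_abs_bin; infer_instance

-- ===== CLAIM (what is proved, stated in full; the proofs are below) =====
def Claim_equal_abs_bin : Prop := ∀ (x : Int), Dom_abs_bin x → Spec_abs_bin x (abs_bin x)

-- ===== LEMMAS AND PROOFS =====

/-- MSB-first binary digits of a natural number (`['0']` for 0): the value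
`Nat.toDigits 2` computes, in structural form. Proof-side helper only. -/
def binChars (y : Nat) : List Char :=
  if _h : y < 2 then [Nat.digitChar y]
  else binChars (y / 2) ++ [Nat.digitChar (y % 2)]
decreasing_by exact Nat.div_lt_self (by omega) (by omega)

lemma toDigitsCore_eq_binChars (f y : Nat) (l : List Char) (hf : y < f) :
    Nat.toDigitsCore 2 f y l = binChars y ++ l := by
  induction f generalizing y l with
  | zero => omega
  | succ f ih =>
    rw [Nat.toDigitsCore, binChars]
    by_cases h2 : y < 2
    · have : y / 2 = 0 := by omega
      simp [this, h2, Nat.mod_eq_of_lt h2]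
    · have h0 : ¬ y / 2 = 0 := by omega
      simp only [h0, dif_neg h2]
      rw [ih (y / 2) _ (by omega)]
      simp

lemma toDigits_two_eq_binChars (y : Nat) : Nat.toDigits 2 y = binChars y := by
  have := toDigitsCore_eq_binChars (y + 1) y [] (by omega)
  simp only [Nat.toDigits] at this ⊢
  simp only [List.append_nil] at this
  exact this

lemma binChars_lt (y : Nat) : y < 2 ^ (binChars y).length := by
  rw [binChars]
  by_cases h : y < 2
  · simpa [h] using h
  · have ih := binChars_lt (y / 2)
    simp only [dif_neg h, List.length_append, List.length_singleton]
    have : 2 ^ ((binChars (y / 2)).length + 1) = 2 * 2 ^ (binChars (y / 2)).length := by ring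
    omega
decreasing_by exact Nat.div_lt_self (by omega) (by omega)

lemma binChars_length_pos (y : Nat) : 0 < (binChars y).length := by
  rw [binChars]; by_cases h : y < 2 <;> simp [h]

lemma binChars_zero : binChars 0 = ['0'] := by rw [binChars]; simp [Nat.digitChar]

lemma binChars_eq_zero_iff (y : Nat) : binChars y = ['0'] → y = 0 := by
  intro h
  by_contra hy
  rw [binChars] at h
  by_cases h2 : y < 2
  · interval_cases y <;> simp_all [Nat.digitChar]
  · simp only [dif_neg h2] at h
    have h1 : (binChars (y / 2)).length = 0 := by
      have := congrArg List.length h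
      simpa using this
    have := binChars_length_pos (y / 2)
    omega

/-- `format(y, '0nb')`: `binChars y` zero-padded on the left to width `n`. -/
def padBin (n y : Nat) : List Char :=
  List.replicate (n - (binChars y).length) '0' ++ binChars y

def flipc (c : Char) : Char := if c = '0' then '1' else '0'

lemma padBin_succ (n : Nat) (hn : 0 < n) (y : Nat) :
    padBin (n + 1) y = padBin n (y / 2) ++ [Nat.digitChar (y % 2)] := by
  unfold padBin
  by_cases h2 : y < 2
  · have hy2 : y / 2 = 0 := by omega
    have hlen : (binChars y).length = 1 := by
      rw [binChars]; simp [h2]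
    rw [hy2, binChars_zero]
    have hdig : binChars y = [Nat.digitChar y] := by rw [binChars]; simp [h2]
    have hmod : y % 2 = y := by omega
    rw [hdig, hmod]
    have hrep : List.replicate n '0' = List.replicate (n-1) '0' ++ ['0'] := by
      conv_lhs => rw [show n = (n-1)+1 by omega]
      rw [List.replicate_succ']
    simp only [List.length_singleton, Nat.add_sub_cancel, hrep, List.append_assoc]
  · conv_lhs => rw [binChars, dif_neg h2]
    simp only [List.length_append, List.length_singleton]
    have : n + 1 - ((binChars (y / 2)).length + 1) = n - (binChars (y / 2)).length := by omega
    rw [this, List.append_assoc]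

lemma flip_padBin (n : Nat) (hn : 0 < n) : ∀ y, y < 2 ^ n →
    (padBin n y).map flipc = padBin n (2 ^ n - 1 - y) := by
  induction n with
  | zero => omega
  | succ n ih =>
    intro y hy
    by_cases hn0 : n = 0
    · subst hn0
      interval_cases y <;> simp [padBin, binChars, flipc, Nat.digitChar]
    · have hnpos : 0 < n := by omega
      rw [padBin_succ n hnpos y, padBin_succ n hnpos (2 ^ (n+1) - 1 - y)]
      have hdiv : (2 ^ (n+1) - 1 - y) / 2 = 2 ^ n - 1 - y / 2 := by
        have h1 : 2 ^ (n+1) = 2 * 2 ^ n := by ring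
        omega
      have hmod : (2 ^ (n+1) - 1 - y) % 2 = 1 - y % 2 := by
        have h1 : 2 ^ (n+1) = 2 * 2 ^ n := by ring
        omega
      have hy2 : y / 2 < 2 ^ n := by
        have h1 : 2 ^ (n+1) = 2 * 2 ^ n := by ring
        omega
      rw [List.map_append, ih hnpos (y / 2) hy2, hdiv, hmod]
      congr 1
      have : y % 2 = 0 ∨ y % 2 = 1 := by omega
      rcases this with h | h <;> simp [h, flipc, Nat.digitChar]

lemma padBin_self (y : Nat) : padBin (binChars y).length y = binChars y := by
  simp [padBin]

-- A's flip loop, as a map over the string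
lemma loop_eq_map (ans : List Char) :
    (PySem.List.pyRange 0 (ans.length : Int) 1).foldl
        (fun acc i => acc ++ [if PySem.List.pyGetD ans i ' ' = '0' then '1' else '0']) []
      = ans.map flipc := by
  rw [PySem.List.foldl_append_singleton_eq_map]
  have h1 : (PySem.List.pyRange 0 (ans.length : Int) 1).map
      (fun i => if PySem.List.pyGetD ans i ' ' = '0' then '1' else '0')
      = ((PySem.List.pyRange 0 (ans.length : Int) 1).map
          (fun i => PySem.List.pyGetD ans i ' ')).map flipc := by
    rw [List.map_map]; rfl
  rw [h1]
  rw [show ((ans.length : Int)) = PySem.List.len ans from rfl]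
  rw [PySem.List.map_pyGetD_pyRange_zero]
  simp

lemma pyBin_drop (y : Int) (hy : 0 ≤ y) :
    PySem.List.slice (PySem.Int.pyBin y).toList (some 2) none = binChars y.toNat := by
  rw [PySem.Int.toList_pyBin]
  have : PySem.Int.toBinChars0b y = '0' :: 'b' :: Nat.toDigits 2 y.toNat := by
    simp [PySem.Int.toBinChars0b, not_lt.mpr hy]
  rw [this]
  rw [show ((some (2:Int)) = some ((2:Nat):Int)) by norm_num, PySem.List.slice_from_natCast]
  simp [toDigits_two_eq_binChars]

-- ===== VERDICT (by name: the statement is the Claim_ definition above) =====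
theorem abs_bin_spec : Claim_equal_abs_bin := by
  intro x _
  unfold Spec_abs_bin abs_bin abs_bin_alt
  simp only []
  have hy : (0:Int) ≤ |x| := abs_nonneg x
  rw [pyBin_drop |x| hy]
  set yn : Nat := (|x|).natAbs with hyn
  have hyt : (|x|).toNat = yn := by omega
  rw [hyt]
  by_cases hx0 : x = 0
  · have h0 : yn = 0 := by simp [hyn, hx0]
    have habs0 : |x| = 0 := by simp [hx0]
    rw [h0, binChars_zero, habs0]
    simp [PySem.List.pyGetD_zero_cons]
  · have hyn0 : yn ≠ 0 := by simp [hyn]; omega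
    have hyabs : ¬ (|x| = 0) := by
      intro h; exact hyn0 (by simp [hyn, h])
    have hguard : ¬ ((binChars yn).length = 1 ∧ PySem.List.pyGetD (binChars yn) 0 ' ' = '0') := by
      rintro ⟨h1, h2⟩
      apply hyn0
      apply binChars_eq_zero_iff
      obtain ⟨c, hc⟩ := List.length_eq_one_iff.mp h1
      rw [hc] at h2 ⊢
      rw [PySem.List.pyGetD_zero_cons] at h2
      rw [h2]
    rw [if_neg hguard, if_neg hyabs]
    by_cases hxn : x < 0
    · have hne : |x| ≠ x := by
        rw [abs_of_neg hxn]; omega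
      have hxge : ¬ (x ≥ 0) := by omega
      rw [if_pos hne, if_neg hxge]
      rw [loop_eq_map]
      set n : Nat := (binChars yn).length with hn
      have hlen : (PySem.Int.toBinChars |x|).length = n := by
        rw [PySem.Int.toBinChars, if_neg (by omega : ¬ |x| < 0), hyt, toDigits_two_eq_binChars]
      rw [hlen]
      congr 1
      have h2 : |x| = (yn : Int) := by
        rw [hyn, Int.abs_eq_natAbs]; simp
      have h3 : yn < 2 ^ n := by rw [hn]; exact binChars_lt yn
      have hcomp : (((1 <<< n : Nat)) : Int) - 1 - |x| = ((2 ^ n - 1 - yn : Nat) : Int) := by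
        rw [Nat.one_shiftLeft, h2]
        have h4 : 1 + yn ≤ 2 ^ n := by omega
        have h5 : 2 ^ n - 1 - yn = 2 ^ n - (1 + yn) := by omega
        rw [h5, Nat.cast_sub h4]
        push_cast
        ring
      rw [hcomp, PySem.Int.toBinChars]
      have hcnn : ¬ (((2 ^ n - 1 - yn : Nat) : Int) < 0) := by omega
      rw [if_neg hcnn]
      simp only [Int.toNat_natCast]
      rw [toDigits_two_eq_binChars]
      have hself : padBin n yn = binChars yn := by rw [hn]; exact padBin_self yn
      have hkey := flip_padBin n (by rw [hn]; exact binChars_length_pos yn) yn h3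
      rw [hself] at hkey
      simpa [padBin] using hkey
    · have hxp : 0 < x := by omega
      have heq : |x| = x := abs_of_pos hxp
      have hge : x ≥ 0 := by omega
      rw [if_neg (by rw [heq]; simp : ¬ |x| ≠ x), if_pos hge]
      congr 1
      rw [PySem.Int.toBinChars, if_neg (by omega : ¬ |x| < 0), hyt, toDigits_two_eq_binChars]
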